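-- pv_equiv track=rewrite | github.com/Andy87877/Codewars | (7)Multiples and Digit Sums.py | procedure
-- ===== SOURCE A (Python) =====
-- def procedure(i):
--     total = 0
--     for j in range(i,101,i):
--         n = j
--         while(n > 0):
--             total += n%10
--             n //= 10
--     return total
-- ===== SOURCE B (Python) =====
-- def procedure(i):
--     # Digit-sum identity: for 0 <= m <= 100, digitsum(m) = m - 9*(m//10) - 9*(m//100)
--     # (casting out nines per power of ten), so no digit extraction is needed at all.
--     return sum(m - 9 * (m // 10) - 9 * (m // 100) for m in range(i, 101, i))
-- ===== Notes on version B (the rewrite author's own statement) =====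
-- stated objective: alternative
-- what changed: Eliminates digit extraction entirely: instead of peeling digits with a while loop (n%10, n//=10), B computes each multiple's digit sum in closed form via the identity digitsum(m) = m - 9*floor(m/10) - 9*floor(m/100), valid for 0 <= m <= 100.
import Mathlib
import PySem

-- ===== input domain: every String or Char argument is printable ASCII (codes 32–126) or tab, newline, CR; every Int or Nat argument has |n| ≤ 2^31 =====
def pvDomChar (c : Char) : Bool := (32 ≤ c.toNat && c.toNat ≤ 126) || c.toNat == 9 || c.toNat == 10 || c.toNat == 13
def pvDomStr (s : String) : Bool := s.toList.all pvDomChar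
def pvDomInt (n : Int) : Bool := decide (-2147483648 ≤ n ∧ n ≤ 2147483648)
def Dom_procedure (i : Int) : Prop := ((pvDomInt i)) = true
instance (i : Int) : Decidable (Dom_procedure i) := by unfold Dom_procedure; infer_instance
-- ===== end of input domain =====

-- B removes digit extraction: it sums the closed-form digit sum
-- m - 9*(m//10) - 9*(m//100) (valid for 0 ≤ m ≤ 100) over the multiples (objective: alternative).

-- ===== PORT A =====
-- the inner `while n > 0` loop; fuel = n.toNat steps always suffice since n strictly shrinks
def digitLoop : Nat → Int → Int → Int
  | 0, _, total => total
  | fuel + 1, n, total =>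
    if 0 < n then digitLoop fuel (PySem.Int.floordiv n 10) (total + PySem.Int.mod n 10)
    else total

def procedure (i : Int) : Int :=
  (PySem.List.pyRange i 101 i).foldl (fun total j => digitLoop j.toNat j total) 0

-- ===== PORT B =====
def closedDigitSum (m : Int) : Int :=
  m - 9 * PySem.Int.floordiv m 10 - 9 * PySem.Int.floordiv m 100

def procedure_alt (i : Int) : Int :=
  ((PySem.List.pyRange i 101 i).map closedDigitSum).sum

-- ===== PRECONDITION & SPEC =====
-- Python's range raises ValueError for step 0, so A raises exactly at i = 0.
def Pre_procedure (i : Int) : Prop := i ≠ 0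
instance (i : Int) : Decidable (Pre_procedure i) := by unfold Pre_procedure; infer_instance
def pvWitness_procedure : Int := 7

def Spec_procedure (i : Int) (out : Int) : Prop := out = procedure_alt i
instance (i : Int) (out : Int) : Decidable (Spec_procedure i out) := by unfold Spec_procedure; infer_instance

-- ===== CLAIM (what is proved, stated in full; the proofs are below) =====
def Claim_equal_procedure : Prop := ∀ (i : Int), Dom_procedure i → Pre_procedure i → Spec_procedure i (procedure i)

-- ===== LEMMAS AND PROOFS =====

-- accumulator form of the inner while loop
theorem digitLoop_acc (fuel : Nat) : ∀ (n t : Int), digitLoop fuel n t = t + digitLoop fuel n 0 := by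
  induction fuel with
  | zero => intro n t; simp [digitLoop]
  | succ f ih =>
    intro n t
    simp only [digitLoop]
    split
    · rw [ih _ (t + _), ih _ (0 + _)]; ring
    · simp

-- per-number agreement of the while loop with the closed-form digit sum, on 1..100
theorem key : ∀ j ∈ PySem.List.pyRange 1 101 1, digitLoop j.toNat j 0 = closedDigitSum j := by
  decide

theorem range_empty_of_neg (i : Int) (hi : i < 0) : PySem.List.pyRange i 101 i = [] := by
  unfold PySem.List.pyRange
  rw [if_neg (by omega)]
  rw [if_neg (by omega), if_neg (by omega)]
  rfl

-- ===== VERDICT (by name: the statement is the Claim_ definition above) =====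
theorem procedure_spec : Claim_equal_procedure := by
  intro i _ hpre
  unfold Spec_procedure procedure procedure_alt
  rcases lt_trichotomy i 0 with hneg | hz | hpos
  · rw [range_empty_of_neg i hneg]; rfl
  · exact absurd hz hpre
  · have hfun : (fun (total j : Int) => digitLoop j.toNat j total)
        = fun total j => total + digitLoop j.toNat j 0 := by
      funext t j; exact digitLoop_acc j.toNat j t
    rw [hfun, PySem.List.foldl_add]
    have : ∀ j ∈ PySem.List.pyRange i 101 i, digitLoop j.toNat j 0 = closedDigitSum j := by
      intro j hj
      have hm := (PySem.List.mem_pyRange_iff_of_pos hpos j).mp hj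
      exact key j ((PySem.List.mem_pyRange_one).mpr ⟨by omega, hm.2.1⟩)
    rw [List.map_congr_left this]
    simp
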